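-- pv_equiv track=rewrite | github.com/kenakingkong/CPE348_program1 | program1.py | get_bitstrings
-- ===== SOURCE A (Python) =====
-- def get_subsets(astring):
--    alist = []
--    temp = []
--    if len(astring) > 0:
--       last = astring[len(astring)-1:]
--       temp = get_subsets(astring[:-1])
--       for i in temp:
--          alist.append(i)
--       for j in temp:
--          alist.append(j+last)
--       return alist
--    else:
--       alist.append(astring)
--       return alist
--
-- def get_bitstrings(string):
--    alist = []
--    subsets = get_subsets(string)
--    for subset in subsets:
--       bits = ['0']*len(string)
--       for char in subset:
--          index = string.index(char)
--          bits[index] = '1'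
--       alist.append([subset,''.join(bits)])
--    return alist
-- ===== SOURCE B (Python) =====
-- def get_bitstrings(string):
--     first = {}
--     for i, c in enumerate(string):
--         if c not in first:
--             first[c] = i
--     acc = [("", "0" * len(string))]
--     for c in string:
--         k = first[c]
--         acc = acc + [(s + c, b[:k] + "1" + b[k+1:]) for (s, b) in acc]
--     return [[s, b] for (s, b) in acc]
-- ===== Notes on version B (the rewrite author's own statement) =====
-- stated objective: faster
-- what changed: B builds the subsets iteratively by left-to-right doubling while carrying each subset's bitstring incrementally (using a precomputed first-occurrence index dict), instead of A's right-recursive subset generation followed by a per-subset inner scan that calls string.index for every character.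
import Mathlib
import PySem

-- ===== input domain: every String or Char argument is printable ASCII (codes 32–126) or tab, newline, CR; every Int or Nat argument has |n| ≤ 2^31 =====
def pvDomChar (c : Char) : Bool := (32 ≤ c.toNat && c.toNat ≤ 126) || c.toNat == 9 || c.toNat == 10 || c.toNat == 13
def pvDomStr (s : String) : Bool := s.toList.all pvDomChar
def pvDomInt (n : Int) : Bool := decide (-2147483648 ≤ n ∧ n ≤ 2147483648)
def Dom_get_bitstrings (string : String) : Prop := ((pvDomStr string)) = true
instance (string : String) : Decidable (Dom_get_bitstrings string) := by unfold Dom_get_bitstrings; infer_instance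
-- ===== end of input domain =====

-- B builds the subsets by one left-to-right doubling pass carrying each subset's bitstring
-- (first-occurrence indices precomputed in a dict), instead of A's right-recursive subset
-- generation followed by a per-subset inner scan calling string.index (objective: faster).

-- ===== PORT A =====
-- A's inner for-loop over one subset ("for char in subset: index = string.index(char); bits[index] = '1'")
def pvBits (full : List Char) (subset : List Char) : List Char :=
  subset.foldl (fun bits ch =>
    match PySem.List.index? full ch with
    | some ix => bits.set ix '1'
    | none => bits)  -- unreachable: every char of a subset occurs in full (Python would raise ValueError)
    (List.replicate full.length '0')

def get_subsets (astring : List Char) : List (List Char) :=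
  if astring.length > 0 then
    let last := PySem.List.slice astring (some ((astring.length : Int) - 1)) none  -- astring[len(astring)-1:]
    let temp := get_subsets (PySem.List.slice astring none (some (-1)))            -- astring[:-1]
    let alist := temp.foldl (fun acc i => acc ++ [i]) ([] : List (List Char))
    temp.foldl (fun acc j => acc ++ [j ++ last]) alist
  else [astring]
termination_by astring.length
decreasing_by simp [PySem.List.slice_to_neg_one, List.length_dropLast]; omega

def get_bitstrings (string : String) : List (List String) :=
  (get_subsets string.toList).foldl
    (fun alist subset =>
      alist ++ [[String.ofList subset, String.ofList (pvBits string.toList subset)]]) []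

-- ===== PORT B =====
-- first = {} ; for i, c in enumerate(string): if c not in first: first[c] = i
def pvFirst (cs : List Char) : PySem.Dict Char Int :=
  (PySem.List.enumerate cs).foldl
    (fun first ic => if (first.get? ic.2).isSome then first else first.insert ic.2 ic.1) ∅

-- acc = acc + [(s + c, b[:k] + "1" + b[k+1:]) for (s, b) in acc] with k = first[c]
def pvStep (first : PySem.Dict Char Int) (acc : List (List Char × List Char)) (c : Char) :
    List (List Char × List Char) :=
  acc ++ acc.map (fun sb =>
    let k := first.getD c 0  -- first[c]; c always is a key (it comes from the string), so no KeyError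
    (sb.1 ++ [c],
     PySem.List.slice sb.2 none (some k) ++ '1' :: PySem.List.slice sb.2 (some (k + 1)) none))

def get_bitstrings_alt (string : String) : List (List String) :=
  let cs := string.toList
  let first := pvFirst cs
  let acc := cs.foldl (pvStep first) [([], List.replicate cs.length '0')]
  acc.map (fun sb => [String.ofList sb.1, String.ofList sb.2])

-- ===== PRECONDITION & SPEC =====
def Spec_get_bitstrings (string : String) (out : List (List String)) : Prop := out = get_bitstrings_alt string
instance (string : String) (out : List (List String)) : Decidable (Spec_get_bitstrings string out) := by unfold Spec_get_bitstrings; infer_instance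

-- ===== CLAIM (what is proved, stated in full; the proofs are below) =====
def Claim_equal_get_bitstrings : Prop := ∀ (string : String), Dom_get_bitstrings string → Spec_get_bitstrings string (get_bitstrings string)

-- ===== LEMMAS AND PROOFS =====

-- the doubling characterisation of A's subset list (B's outer loop shape)
def pvSubsFold (cs : List Char) : List (List Char) :=
  cs.foldl (fun acc c => acc ++ acc.map (· ++ [c])) [[]]

theorem pv_get_subsets_eq (cs : List Char) : get_subsets cs = pvSubsFold cs := by
  induction cs using List.reverseRecOn with
  | nil => simp [get_subsets, pvSubsFold]
  | append_singleton l c ih =>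
    rw [get_subsets]
    have hlen : (l ++ [c]).length = l.length + 1 := by simp
    have h1 : PySem.List.slice (l ++ [c]) none (some (-1)) = l := by
      rw [PySem.List.slice_to_neg_one]; simp
    simp only [hlen, gt_iff_lt, Nat.succ_pos, if_pos, h1,
      PySem.List.foldl_append_singleton, PySem.List.foldl_append_singleton_eq_map, List.nil_append]
    rw [ih]
    simp [pvSubsFold, List.foldl_append]

theorem pv_first_fold (r : List Char) (n : Int) (d : PySem.Dict Char Int) (c : Char) :
    ((PySem.List.enumerate r n).foldl
      (fun first ic => if (first.get? ic.2).isSome then first else first.insert ic.2 ic.1) d).get? c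
    = match d.get? c with
      | some v => some v
      | none => (PySem.List.index? r c).map (fun i => n + i) := by
  induction r generalizing n d with
  | nil => cases h : d.get? c <;> simp [PySem.List.enumerate, h, PySem.List.index?]
  | cons x r ih =>
    have he : PySem.List.enumerate (x :: r) n = (n, x) :: PySem.List.enumerate r (n+1) := by
      simp [PySem.List.enumerate]
    rw [he, List.foldl_cons, ih]
    by_cases hcx : c = x
    · subst hcx
      cases h : d.get? c with
      | some v => simp [h]
      | none =>
        simp only [Option.isSome_none, Bool.false_eq_true, if_false]
        rw [PySem.Dict.get?_insert]
        simp [List.idxOf?_cons]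
    · have hxc : ¬ (x = c) := fun h => hcx h.symm
      have hidx : PySem.List.index? (x :: r) c = (PySem.List.index? r c).map (· + 1) := by
        simp [List.idxOf?_cons, hxc]
      cases h : d.get? x with
      | some v =>
        simp only [Option.isSome_some, if_true, hidx]
        cases d.get? c with
        | some v' => simp
        | none => cases PySem.List.index? r c <;> simp; ring
      | none =>
        simp only [Option.isSome_none, Bool.false_eq_true, if_false]
        rw [PySem.Dict.get?_insert, if_neg hcx]
        cases d.get? c with
        | some v' => simp
        | none =>
          simp only [hidx]
          cases PySem.List.index? r c <;> simp; ring

theorem pv_first_spec (cs : List Char) (c : Char) (i : Nat)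
    (h : PySem.List.index? cs c = some i) : (pvFirst cs).getD c 0 = (i : Int) := by
  have h0 : (∅ : PySem.Dict Char Int).get? c = none :=
    (PySem.Dict.get?_eq_none_iff_contains ∅ c).mpr rfl
  have hf := pv_first_fold cs 0 ∅ c
  rw [h0] at hf
  simp only [h, zero_add] at hf
  rw [pvFirst] at *
  simp [PySem.Dict.getD, hf]

theorem pv_bits_step_len (s : List Char) (full : List Char) (bits : List Char) :
    (s.foldl (fun bits ch =>
      match PySem.List.index? full ch with
      | some ix => bits.set ix '1'
      | none => bits) bits).length = bits.length := by
  induction s generalizing bits with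
  | nil => rfl
  | cons x s ih =>
    rw [List.foldl_cons, ih]
    cases PySem.List.index? full x <;> simp

theorem pv_bits_len (full s : List Char) : (pvBits full s).length = full.length := by
  rw [pvBits, pv_bits_step_len]; simp

theorem pv_bits_append (full s : List Char) (c : Char) (i : Nat)
    (h : PySem.List.index? full c = some i) :
    pvBits full (s ++ [c]) = (pvBits full s).set i '1' := by
  rw [pvBits, pvBits, List.foldl_append]
  simp only [List.foldl_cons, List.foldl_nil, h]

theorem pv_surgery (b : List Char) (i : Nat) (h : i < b.length) :
    PySem.List.slice b none (some (i : Int)) ++ '1' ::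
      PySem.List.slice b (some ((i : Int) + 1)) none = b.set i '1' := by
  rw [PySem.List.slice_to_natCast]
  have : ((i : Int) + 1) = ((i + 1 : Nat) : Int) := by push_cast; ring
  rw [this, PySem.List.slice_from_natCast]
  exact (List.set_eq_take_cons_drop '1' h).symm

theorem pv_fold_inv (full : List Char) (l : List Char) (hl : ∀ c ∈ l, c ∈ full)
    (subs : List (List Char)) :
    List.foldl (pvStep (pvFirst full)) (subs.map (fun s => (s, pvBits full s))) l
    = (List.foldl (fun acc c => acc ++ acc.map (· ++ [c])) subs l).map
        (fun s => (s, pvBits full s)) := by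
  induction l generalizing subs with
  | nil => simp
  | cons c l ih =>
    have hc : c ∈ full := hl c (List.mem_cons_self)
    obtain ⟨i, hi⟩ : ∃ i, PySem.List.index? full c = some i :=
      Option.isSome_iff_exists.mp ((PySem.List.index?_isSome_iff full c).mpr hc)
    obtain ⟨hlt, -, -⟩ := PySem.List.getElem_of_index?_eq_some hi
    have hstep : pvStep (pvFirst full) (subs.map (fun s => (s, pvBits full s))) c
        = (subs ++ subs.map (· ++ [c])).map (fun s => (s, pvBits full s)) := by
      rw [pvStep, List.map_append, List.map_map, List.map_map]
      congr 1
      apply List.map_congr_left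
      intro s _
      simp only [Function.comp_apply]
      rw [pv_first_spec full c i hi]
      rw [pv_surgery _ i (by rw [pv_bits_len]; exact hlt)]
      rw [← pv_bits_append full s c i hi]
    rw [List.foldl_cons, hstep, List.foldl_cons]
    exact ih (fun x hx => hl x (List.mem_cons_of_mem c hx)) _

-- ===== VERDICT (by name: the statement is the Claim_ definition above) =====
theorem get_bitstrings_spec : Claim_equal_get_bitstrings := by
  intro string _
  unfold Spec_get_bitstrings
  rw [get_bitstrings, PySem.List.foldl_append_singleton_eq_map, List.nil_append,
    pv_get_subsets_eq]
  show _ = (string.toList.foldl (pvStep (pvFirst string.toList))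
      [([], List.replicate string.toList.length '0')]).map
      (fun sb => [String.ofList sb.1, String.ofList sb.2])
  have hinit : [(([] : List Char), List.replicate string.toList.length '0')]
      = [([] : List Char)].map (fun s => (s, pvBits string.toList s)) := by
    simp [pvBits]
  rw [hinit, pv_fold_inv string.toList string.toList (fun _ hc => hc) [[]]]
  rw [pvSubsFold, List.map_map]
  rfl
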